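-- pv_equiv track=rewrite | github.com/lksshw/SRNet | SRNet-Datagen/Synthtext/poisson_reconstruct.py | contiguous_regions
-- ===== SOURCE A (Python) =====
-- def contiguous_regions(mask):
--
--     in_region = None
--     boundaries = []
--     for i, val in enumerate(mask):
--         if in_region is None and val:
--             in_region = i
--         elif in_region is not None and not val:
--             boundaries.append((in_region, i))
--             in_region = None
--
--     if in_region is not None:
--         boundaries.append((in_region, i + 1))
--     return boundaries
-- ===== SOURCE B (Python) =====
-- def contiguous_regions(mask):
--     p = [False] + [bool(v) for v in mask] + [False]
--     transitions = [i for i, (a, b) in enumerate(zip(p, p[1:])) if a != b]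
--     it = iter(transitions)
--     return list(zip(it, it))
-- ===== Notes on version B (the rewrite author's own statement) =====
-- stated objective: alternative
-- what changed: Replaced the in_region state machine (with a trailing flush) by a padded transition-list decomposition: pad the mask with False on both sides, list the indices where consecutive values differ, and pair them up as (start, end).
import Mathlib
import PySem

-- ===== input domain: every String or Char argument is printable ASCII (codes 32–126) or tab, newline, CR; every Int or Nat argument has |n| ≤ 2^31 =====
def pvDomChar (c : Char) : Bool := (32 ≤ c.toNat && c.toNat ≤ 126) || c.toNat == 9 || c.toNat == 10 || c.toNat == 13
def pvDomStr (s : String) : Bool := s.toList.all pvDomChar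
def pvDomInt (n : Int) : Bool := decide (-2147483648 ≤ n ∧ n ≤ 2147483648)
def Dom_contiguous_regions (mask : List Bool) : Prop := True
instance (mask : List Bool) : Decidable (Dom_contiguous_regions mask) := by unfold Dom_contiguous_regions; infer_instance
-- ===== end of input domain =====

-- B replaces A's in_region state machine (with trailing flush) by a padded transition-list
-- decomposition (pad with False, list indices where consecutive values differ, pair them up);
-- objective: alternative (same O(n) cost, different decomposition).

-- ===== PORT A =====
-- loop body of A: state = (in_region, boundaries), element = (i, val)
def pvStepA (s : Option Int × List (Int × Int)) (iv : Int × Bool) : Option Int × List (Int × Int) :=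
  match s, iv with
  | (none, bs), (i, val) => if val then (some i, bs) else (none, bs)
  | (some r, bs), (i, val) => if val then (some r, bs) else (none, bs ++ [(r, i)])

def contiguous_regions (mask : List Bool) : List (Int × Int) :=
  let st := (PySem.List.enumerate mask).foldl pvStepA (none, [])
  -- final flush: in Python `i + 1` where i is the last loop index; the flush only fires
  -- when the loop ran, where i + 1 = len(mask)
  match st.1 with
  | some r => st.2 ++ [(r, (mask.length : Int))]
  | none => st.2

-- ===== PORT B =====
-- port of Source B's `it = iter(transitions); list(zip(it, it))`: zip on one shared iterator
-- consumes two elements per output pair and drops a leftover — exactly this recursion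
def pvPairs : List Int → List (Int × Int)
  | t0 :: t1 :: rest => (t0, t1) :: pvPairs rest
  | _ => []

def contiguous_regions_alt (mask : List Bool) : List (Int × Int) :=
  let p := [false] ++ mask ++ [false]
  let transitions :=
    ((PySem.List.enumerate (p.zip p.tail)).filter (fun x => x.2.1 ≠ x.2.2)).map (·.1)
  pvPairs transitions

-- ===== PRECONDITION & SPEC =====
def Spec_contiguous_regions (mask : List Bool) (out : List (Int × Int)) : Prop := out = contiguous_regions_alt mask
instance (mask : List Bool) (out : List (Int × Int)) : Decidable (Spec_contiguous_regions mask out) := by unfold Spec_contiguous_regions; infer_instance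

-- ===== CLAIM (what is proved, stated in full; the proofs are below) =====
def Claim_equal_contiguous_regions : Prop := ∀ (mask : List Bool), Dom_contiguous_regions mask → Spec_contiguous_regions mask (contiguous_regions mask)

-- ===== LEMMAS AND PROOFS =====

-- transition indices of prev :: xs, starting at index i
def pvEdges (prev : Bool) : List Bool → Int → List Int
  | [], _ => []
  | x :: xs, i => if prev ≠ x then i :: pvEdges x xs (i + 1) else pvEdges x xs (i + 1)

-- reference semantics of A's remaining loop from index i with state s
def pvRunA : List Bool → Int → Option Int → List (Int × Int)
  | [], _, none => []
  | [], i, some r => [(r, i)]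
  | x :: xs, i, none => if x then pvRunA xs (i + 1) (some i) else pvRunA xs (i + 1) none
  | x :: xs, i, some r => if x then pvRunA xs (i + 1) (some r) else (r, i) :: pvRunA xs (i + 1) none

def pvPairs1 (r : Int) : List Int → List (Int × Int)
  | e :: rest => (r, e) :: pvPairs rest
  | [] => []

theorem pvPairs_cons (e : Int) (ts : List Int) : pvPairs (e :: ts) = pvPairs1 e ts := by
  cases ts <;> simp [pvPairs, pvPairs1]

theorem pv_main (xs : List Bool) :
    (∀ i : Int, pvPairs (pvEdges false (xs ++ [false]) i) = pvRunA xs i none) ∧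
    (∀ (i r : Int), pvPairs1 r (pvEdges true (xs ++ [false]) i) = pvRunA xs i (some r)) := by
  induction xs with
  | nil => simp [pvEdges, pvRunA, pvPairs, pvPairs1]
  | cons x xs ih =>
    constructor
    · intro i
      cases x with
      | true =>
        simp only [List.cons_append, pvEdges, pvRunA]
        simp [pvPairs_cons, ih.2]
      | false =>
        simp only [List.cons_append, pvEdges, pvRunA]
        simp [ih.1]
    · intro i r
      cases x with
      | true =>
        simp only [List.cons_append, pvEdges, pvRunA]
        simp [ih.2]
      | false =>
        simp only [List.cons_append, pvEdges, pvRunA, pvPairs1]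
        simp [ih.1]

theorem pv_A_loop (xs : List Bool) :
    ∀ (i : Int) (s : Option Int) (acc : List (Int × Int)),
    (match ((PySem.List.enumerate xs i).foldl pvStepA (s, acc) : Option Int × List (Int × Int)) with
     | (some r, bs) => bs ++ [(r, i + (xs.length : Int))]
     | (none, bs) => bs)
      = acc ++ pvRunA xs i s := by
  induction xs with
  | nil =>
    intro i s acc
    cases s <;> simp [PySem.List.enumerate, pvRunA]
  | cons x xs ih =>
    intro i s acc
    rw [PySem.List.enumerate_cons]
    cases s with
    | none =>
      cases x with
      | true =>
        simp only [List.foldl_cons, pvStepA, pvRunA]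
        have := ih (i + 1) (some i) acc
        simpa [add_assoc, add_comm, add_left_comm] using this
      | false =>
        simp only [List.foldl_cons, pvStepA, pvRunA, Bool.false_eq_true, if_false]
        have := ih (i + 1) none acc
        simpa [add_assoc, add_comm, add_left_comm] using this
    | some r =>
      cases x with
      | true =>
        simp only [List.foldl_cons, pvStepA, pvRunA]
        have := ih (i + 1) (some r) acc
        simpa [add_assoc, add_comm, add_left_comm] using this
      | false =>
        simp only [List.foldl_cons, pvStepA, pvRunA, Bool.false_eq_true, if_false]
        have := ih (i + 1) none (acc ++ [(r, i)])
        simpa [add_assoc, add_comm, add_left_comm] using this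

theorem pv_A_eq_runA (mask : List Bool) :
    contiguous_regions mask = pvRunA mask 0 none := by
  have h := pv_A_loop mask 0 none []
  simp only [contiguous_regions]
  rcases hst : (PySem.List.enumerate mask).foldl pvStepA (none, []) with ⟨a, b⟩
  rw [hst] at h
  cases a <;> simpa using h

theorem pv_B_trans (xs : List Bool) :
    ∀ (prev : Bool) (s : Int),
    ((PySem.List.enumerate ((prev :: xs).zip xs) s).filter (fun x => x.2.1 ≠ x.2.2)).map (·.1)
      = pvEdges prev xs s := by
  induction xs with
  | nil => intro prev s; simp [pvEdges]
  | cons x xs ih =>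
    intro prev s
    simp only [List.zip_cons_cons, PySem.List.enumerate_cons, List.filter_cons, pvEdges]
    by_cases h : prev = x
    · simpa [h] using ih x (s + 1)
    · simpa [h] using ih x (s + 1)

theorem pv_B_eq (mask : List Bool) :
    contiguous_regions_alt mask = pvPairs (pvEdges false (mask ++ [false]) 0) := by
  simp only [contiguous_regions_alt, List.cons_append, List.nil_append, List.tail_cons]
  rw [pv_B_trans]

-- ===== VERDICT (by name: the statement is the Claim_ definition above) =====
theorem contiguous_regions_spec : Claim_equal_contiguous_regions := by
  intro mask _
  show contiguous_regions mask = contiguous_regions_alt mask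
  rw [pv_A_eq_runA, pv_B_eq, (pv_main mask).1]
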